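-- pv_equiv track=rewrite | github.com/smiks/CodeWars | Explosive Sum/program.py | doTheWork
-- ===== SOURCE A (Python) =====
-- def doTheWork(S, m, n):
--     # We need n+1 rows as the table is consturcted in bottom up
--     # manner using the base case 0 value case (n = 0)
--     table = [[0 for x in range(m)] for x in range(n+1)]
--
--     # Fill the enteries for 0 value case (n = 0)
--     for i in range(m):
--         table[0][i] = 1
--
--     # Fill rest of the table enteries in bottom up manner
--     for i in range(1, n+1):
--         for j in range(m):
--             # Count of solutions including S[j]
--             x = table[i - S[j]][j] if i-S[j] >= 0 else 0
--
--             # Count of solutions excluding S[j]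
--             y = table[i][j-1] if j >= 1 else 0
--
--             # total count
--             table[i][j] = x + y
--
--     return table[n][m-1]
-- ===== SOURCE B (Python) =====
-- def doTheWork(S, m, n):
--     # 1D coin-change DP over the first m parts (coin-outer, amount-inner).
--     dp = [0] * (n + 1)
--     dp[0] = 1
--     j = 0
--     while j != m:
--         c = S[j]
--         if c > 0:
--             for amount in range(c, n + 1):
--                 dp[amount] += dp[amount - c]
--         j += 1
--     return dp[n]
-- ===== Notes on version B (the rewrite author's own statement) =====
-- stated objective: simpler
-- what changed: Replaces the (n+1) x m 2D table filled amount-major by a single 1D dp array of length n+1 updated coin-major (outer loop over the first m parts, inner loop over the amounts), skipping non-positive parts; returns dp[n].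
-- outside the precondition, e.g. on doTheWork([1], 5, 0): A returns 1, B raises IndexError
import Mathlib
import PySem

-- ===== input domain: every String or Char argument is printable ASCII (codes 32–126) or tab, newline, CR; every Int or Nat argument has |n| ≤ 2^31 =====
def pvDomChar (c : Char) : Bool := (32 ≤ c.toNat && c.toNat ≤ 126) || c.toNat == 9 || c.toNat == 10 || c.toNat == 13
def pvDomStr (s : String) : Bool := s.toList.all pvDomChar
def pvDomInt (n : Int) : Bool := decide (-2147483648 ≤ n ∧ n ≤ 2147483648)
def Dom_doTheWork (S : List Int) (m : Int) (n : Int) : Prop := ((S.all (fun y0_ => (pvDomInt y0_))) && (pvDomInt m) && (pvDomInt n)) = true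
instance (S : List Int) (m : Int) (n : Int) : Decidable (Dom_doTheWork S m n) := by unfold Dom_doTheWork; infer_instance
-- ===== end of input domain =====

-- B replaces A's (n+1)×m amount-major 2D table by a 1D coin-major dp pass (O(n) space instead of O(n·m)); equal on Pre_.


-- ===== PORT A =====
-- table[i][j] read; the 0 / [] defaults are hit only where Python raises IndexError (outside Pre_).
def pvGet2 (t : List (List Int)) (i j : Int) : Int :=
  PySem.List.pyGetD (PySem.List.pyGetD t i []) j 0
-- table[i][j] = v (row fetch then in-place element assignment); defaults as above.
def pvSet2 (t : List (List Int)) (i j : Int) (v : Int) : List (List Int) :=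
  PySem.List.pySetD t i (PySem.List.pySetD (PySem.List.pyGetD t i []) j v)

def doTheWork (S : List Int) (m : Int) (n : Int) : Int :=
  let table : List (List Int) :=
    (PySem.List.pyRange 0 (n+1) 1).map (fun _ => (PySem.List.pyRange 0 m 1).map (fun _ => (0:Int)))
  let table := (PySem.List.pyRange 0 m 1).foldl (fun t i => pvSet2 t 0 i 1) table
  let table := (PySem.List.pyRange 1 (n+1) 1).foldl (fun t i =>
      (PySem.List.pyRange 0 m 1).foldl (fun t j =>
        let x := if i - PySem.List.pyGetD S j 0 ≥ 0 then pvGet2 t (i - PySem.List.pyGetD S j 0) j else 0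
        let y := if j ≥ 1 then pvGet2 t i (j-1) else 0
        pvSet2 t i j (x + y)) t) table
  pvGet2 table n (m-1)

-- ===== PORT B =====
-- the 'while j != m' loop of B; the fuel m.toNat bounds it exactly for 0 ≤ m (every input in Pre_);
-- for m < 0 Python runs past the list and raises IndexError (outside Pre_), the port just stops.
def pvBLoop (S : List Int) (m n : Int) : Nat → Int → List Int → List Int
  | 0, _, dp => dp
  | fuel+1, j, dp =>
      if j = m then dp
      else
        let c := PySem.List.pyGetD S j 0                  -- c = S[j] (0 default only where Python raises, outside Pre_)
        pvBLoop S m n fuel (j+1)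
          (if c > 0 then
            (PySem.List.pyRange c (n+1) 1).foldl (fun dp a =>
              PySem.List.pySetD dp a (PySem.List.pyGetD dp a 0 + PySem.List.pyGetD dp (a - c) 0)) dp
          else dp)

def doTheWork_alt (S : List Int) (m : Int) (n : Int) : Int :=
  let dp : List Int := List.replicate (n+1).toNat 0       -- [0] * (n + 1)
  let dp := PySem.List.pySetD dp 0 1                      -- dp[0] = 1 (IndexError when n < 0: outside Pre_)
  let dp := pvBLoop S m n m.toNat 0 dp                    -- while j != m: process S[j]
  PySem.List.pyGetD dp n 0

-- ===== PRECONDITION & SPEC =====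
-- Pre_ excludes the inputs where A raises IndexError (m < 1; n < 0; and, for n ≥ 1, m > len(S) or a
-- negative part among the first m) and additionally the inputs with n = 0 and m > len(S), where A
-- returns 1 only because with n = 0 its filling loops never touch S, while B, which always reads the
-- first m parts, raises IndexError there.
def Pre_doTheWork (S : List Int) (m : Int) (n : Int) : Prop :=
  1 ≤ m ∧ 0 ≤ n ∧ m ≤ (S.length : Int) ∧ (n = 0 ∨ ∀ c ∈ S.take m.toNat, 0 ≤ c)
instance (S : List Int) (m : Int) (n : Int) : Decidable (Pre_doTheWork S m n) := by
  unfold Pre_doTheWork; infer_instance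
def pvWitness_doTheWork : List Int × Int × Int := ([1, 2, 5], 3, 10)

def Spec_doTheWork (S : List Int) (m : Int) (n : Int) (out : Int) : Prop := out = doTheWork_alt S m n
instance (S : List Int) (m : Int) (n : Int) (out : Int) : Decidable (Spec_doTheWork S m n out) := by
  unfold Spec_doTheWork; infer_instance

-- ===== CLAIM (what is proved, stated in full; the proofs are below) =====
def Claim_equal_doTheWork : Prop := ∀ (S : List Int) (m : Int) (n : Int), Dom_doTheWork S m n → Pre_doTheWork S m n → Spec_doTheWork S m n (doTheWork S m n)

-- ===== LEMMAS AND PROOFS =====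

-- Number of ways to write amount i as an ordered-multiset sum of parts drawn (with repetition)
-- from the list cs, where non-positive entries of cs contribute nothing; coins are consumed
-- from the head (= the LAST-processed coin of either program).
def pvF : List Int → Nat → Int
  | _, 0 => 1
  | [], _+1 => 0
  | c :: cs, i+1 =>
      (if h : 0 < c ∧ c.toNat ≤ i+1 then pvF (c :: cs) (i+1 - c.toNat) else 0) + pvF cs (i+1)
termination_by cs i => (cs.length, i)
decreasing_by
  all_goals first
    | (apply Prod.Lex.right; omega)
    | (apply Prod.Lex.left; simp)

theorem pvF_zero (cs : List Int) : pvF cs 0 = 1 := by cases cs <;> simp [pvF]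

theorem pvF_nil (i : Nat) : pvF [] i = if i = 0 then 1 else 0 := by
  cases i <;> simp [pvF]

theorem pvF_cons (c : Int) (cs : List Int) (i : Nat) (hi : 1 ≤ i) :
    pvF (c :: cs) i = (if 0 < c ∧ c.toNat ≤ i then pvF (c :: cs) (i - c.toNat) else 0) + pvF cs i := by
  obtain ⟨j, rfl⟩ : ∃ j, i = j + 1 := ⟨i - 1, by omega⟩
  rw [pvF]
  by_cases h : 0 < c ∧ c.toNat ≤ j + 1
  · rw [dif_pos h, if_pos h]
  · rw [dif_neg h, if_neg h]

theorem pvF_cons_nonpos (c : Int) (cs : List Int) (i : Nat) (hc : c ≤ 0) :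
    pvF (c :: cs) i = pvF cs i := by
  cases i with
  | zero => simp [pvF_zero]
  | succ j => rw [pvF_cons _ _ _ (by omega), if_neg (by omega), zero_add]

theorem pvF_cons_lt (c : Int) (cs : List Int) (i : Nat) (hi : i < c.toNat) :
    pvF (c :: cs) i = pvF cs i := by
  cases i with
  | zero => simp [pvF_zero]
  | succ j => rw [pvF_cons _ _ _ (by omega), if_neg (by omega), zero_add]

-- generic tabulation helpers
def pvMk1 (N : Nat) (g : Nat → Int) : List Int := (List.range N).map g
def pvMk (R C : Nat) (g : Nat → Nat → Int) : List (List Int) := (List.range R).map fun r => pvMk1 C (g r)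

theorem pvMk1_length (N : Nat) (g : Nat → Int) : (pvMk1 N g).length = N := by simp [pvMk1]
theorem pvMk_length (R C : Nat) (g : Nat → Nat → Int) : (pvMk R C g).length = R := by simp [pvMk]

theorem pvMk1_congr (N : Nat) (g g' : Nat → Int) (h : ∀ i, i < N → g i = g' i) :
    pvMk1 N g = pvMk1 N g' := by
  apply List.ext_getElem <;> simp [pvMk1]
  intro i hi; exact h i hi

theorem pvMk_congr (R C : Nat) (g g' : Nat → Nat → Int) (h : ∀ r k, r < R → k < C → g r k = g' r k) :
    pvMk R C g = pvMk R C g' := by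
  apply List.ext_getElem <;> simp [pvMk]
  intro r hr; exact pvMk1_congr _ _ _ (fun k hk => h r k hr hk)

theorem pvMk1_get (N : Nat) (g : Nat → Int) (i : Int) (h0 : 0 ≤ i) (h1 : i.toNat < N) :
    PySem.List.pyGetD (pvMk1 N g) i 0 = g i.toNat := by
  rw [PySem.List.pyGetD_eq_getElem _ 0 h0 (by rw [pvMk1_length]; omega)]
  simp [pvMk1]

theorem pvMk1_set (N : Nat) (g : Nat → Int) (i : Int) (v : Int) (h0 : 0 ≤ i) (h1 : i.toNat < N) :
    PySem.List.pySetD (pvMk1 N g) i v = pvMk1 N (fun k => if k = i.toNat then v else g k) := by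
  rw [PySem.List.pySetD_of_nonneg _ _ h0]
  apply List.ext_getElem
  · simp [pvMk1_length]
  · intro k hk hk'
    simp only [pvMk1, List.getElem_set, List.getElem_map, List.getElem_range]
    rcases eq_or_ne k i.toNat with h | h
    · rw [if_pos h.symm, if_pos h]
    · rw [if_neg (Ne.symm h), if_neg h]

theorem pvMk_row (R C : Nat) (g : Nat → Nat → Int) (i : Int) (h0 : 0 ≤ i) (h1 : i.toNat < R) :
    PySem.List.pyGetD (pvMk R C g) i [] = pvMk1 C (g i.toNat) := by
  rw [PySem.List.pyGetD_eq_getElem _ ([] : List Int) h0 (by rw [pvMk_length]; omega)]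
  simp only [pvMk, List.getElem_map, List.getElem_range]

theorem pvMk_get (R C : Nat) (g : Nat → Nat → Int) (i j : Int)
    (hi0 : 0 ≤ i) (hi1 : i.toNat < R) (hj0 : 0 ≤ j) (hj1 : j.toNat < C) :
    pvGet2 (pvMk R C g) i j = g i.toNat j.toNat := by
  rw [pvGet2, pvMk_row _ _ _ _ hi0 hi1, pvMk1_get _ _ _ hj0 hj1]

theorem pvMk_set (R C : Nat) (g : Nat → Nat → Int) (i j : Int) (v : Int)
    (hi0 : 0 ≤ i) (hi1 : i.toNat < R) (hj0 : 0 ≤ j) (hj1 : j.toNat < C) :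
    pvSet2 (pvMk R C g) i j v
      = pvMk R C (fun r k => if r = i.toNat ∧ k = j.toNat then v else g r k) := by
  rw [pvSet2, pvMk_row _ _ _ _ hi0 hi1, pvMk1_set _ _ _ _ hj0 hj1,
      PySem.List.pySetD_of_nonneg _ _ hi0]
  apply List.ext_getElem
  · simp [pvMk_length]
  · intro r hr hr'
    simp only [pvMk, List.getElem_set, List.getElem_map, List.getElem_range]
    simp [pvMk_length] at hr
    split_ifs with h
    · subst h
      exact pvMk1_congr _ _ _ (fun k hk => by by_cases hkj : k = j.toNat <;> simp [hkj])
    · exact pvMk1_congr _ _ _ (fun k hk => by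
        simp [show ¬ (r = i.toNat ∧ k = j.toNat) from fun ⟨h1, _⟩ => h (h1 ▸ rfl)])


-- ----- B side: the 1D dp pass computes pvF -----

theorem pvInit (nN : Nat) : (1 : Int) :: List.replicate nN 0 = pvMk1 (nN+1) (pvF []) := by
  apply List.ext_getElem
  · simp [pvMk1_length]
  · intro k hk hk'
    simp only [pvMk1, List.getElem_map, List.getElem_range]
    cases k with
    | zero => simp [pvF_zero]
    | succ j =>
      simp only [List.getElem_cons_succ, pvF_nil]
      simp at hk
      simp [List.getElem_replicate]

theorem B_inner (nN : Nat) (q : List Int) (c : Int) (hc : 0 < c) (n : Int)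
    (hn : n.toNat = nN) (hn0 : 0 ≤ n) :
    ∀ (d : Nat) (a : Int), 0 ≤ a → ((n+1) - a).toNat ≤ d → c ≤ a →
    (PySem.List.pyRange a (n+1) 1).foldl (fun dp x =>
        PySem.List.pySetD dp x (PySem.List.pyGetD dp x 0 + PySem.List.pyGetD dp (x - c) 0))
      (pvMk1 (nN+1) (fun i => if i < a.toNat then pvF (c :: q) i else pvF q i))
    = pvMk1 (nN+1) (pvF (c :: q)) := by
  intro d
  induction d with
  | zero =>
    intro a ha0 had hca
    rw [PySem.List.pyRange_one_eq_nil (by omega)]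
    exact pvMk1_congr _ _ _ (fun i hi => by rw [if_pos (by omega)])
  | succ d ih =>
    intro a ha0 had hca
    by_cases hend : n + 1 ≤ a
    · rw [PySem.List.pyRange_one_eq_nil hend]
      exact pvMk1_congr _ _ _ (fun i hi => by rw [if_pos (by omega)])
    · rw [PySem.List.pyRange_one_cons (by omega), List.foldl_cons]
      have haN : a.toNat < nN + 1 := by omega
      have hacN : (a - c).toNat < nN + 1 := by omega
      rw [pvMk1_get _ _ _ ha0 haN, pvMk1_get _ _ _ (by omega) hacN,
          pvMk1_set _ _ _ _ ha0 haN]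
      rw [if_neg (by omega), if_pos (by omega)]
      have step : (fun k => if k = a.toNat then pvF q a.toNat + pvF (c :: q) ((a - c).toNat) else
              if k < a.toNat then pvF (c :: q) k else pvF q k)
          = fun i => if i < (a+1).toNat then pvF (c :: q) i else pvF q i := by
        funext k
        rcases eq_or_ne k a.toNat with h | h
        · subst h
          rw [if_pos rfl, if_pos (by omega)]
          rw [pvF_cons c q a.toNat (by omega), if_pos ⟨hc, by omega⟩]
          have h2 : a.toNat - c.toNat = (a - c).toNat := by omega
          rw [h2, Int.add_comm]
        · rw [if_neg h]
          rcases lt_or_ge k a.toNat with h2 | h2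
          · rw [if_pos h2, if_pos (by omega)]
          · rw [if_neg (by omega), if_neg (by omega)]
      rw [step]
      exact ih (a+1) (by omega) (by omega) (by omega)

theorem B_outer (S : List Int) (m n : Int) (hmlen : m ≤ (S.length : Int)) (hn0 : 0 ≤ n) :
    ∀ (fuel : Nat) (p : Nat), (p : Int) ≤ m → m.toNat - p ≤ fuel →
    pvBLoop S m n fuel (p : Int) (pvMk1 (n.toNat+1) (pvF ((S.take p).reverse)))
    = pvMk1 (n.toNat+1) (pvF ((S.take m.toNat).reverse)) := by
  intro fuel
  induction fuel with
  | zero =>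
    intro p hp hd
    have : p = m.toNat := by omega
    subst this
    rfl
  | succ fuel ih =>
    intro p hp hd
    rw [pvBLoop]
    by_cases hend : (p : Int) = m
    · rw [if_pos hend]
      have : p = m.toNat := by omega
      subst this
      rfl
    · rw [if_neg hend]
      have hpS : p < S.length := by omega
      have hcget : PySem.List.pyGetD S (p : Int) 0 = S[p] := by
        rw [PySem.List.pyGetD_eq_getElem _ 0 (by omega) (by omega)]
        simp
      have htake : (S.take (p+1)).reverse = S[p] :: (S.take p).reverse := by
        rw [List.take_succ, List.getElem?_eq_getElem hpS]
        simp
      rw [hcget]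
      have hstep :
          (if S[p] > 0 then
            (PySem.List.pyRange S[p] (n+1) 1).foldl (fun dp a =>
              PySem.List.pySetD dp a
                (PySem.List.pyGetD dp a 0 + PySem.List.pyGetD dp (a - S[p]) 0))
              (pvMk1 (n.toNat+1) (pvF ((S.take p).reverse)))
          else pvMk1 (n.toNat+1) (pvF ((S.take p).reverse)))
          = pvMk1 (n.toNat+1) (pvF ((S.take (p+1)).reverse)) := by
        by_cases hc : S[p] > 0
        · rw [if_pos hc]
          have start : pvMk1 (n.toNat+1) (pvF ((S.take p).reverse))
              = pvMk1 (n.toNat+1) (fun i => if i < S[p].toNat then pvF (S[p] :: (S.take p).reverse) i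
                  else pvF ((S.take p).reverse) i) :=
            pvMk1_congr _ _ _ (fun i hi => by
              rcases lt_or_ge i S[p].toNat with h | h
              · rw [if_pos h, pvF_cons_lt _ _ _ h]
              · rw [if_neg (by omega)])
          rw [start,
              B_inner n.toNat ((S.take p).reverse) S[p] hc n rfl hn0
                ((n + 1 - S[p]).toNat) S[p] (by omega) (by omega) le_rfl,
              ← htake]
        · rw [if_neg hc, htake]
          exact pvMk1_congr _ _ _ (fun i hi => (pvF_cons_nonpos _ _ _ (by omega)).symm)
      show pvBLoop S m n fuel ((p:Int) + 1)
          (if S[p] > 0 then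
            (PySem.List.pyRange S[p] (n+1) 1).foldl (fun dp a =>
              PySem.List.pySetD dp a
                (PySem.List.pyGetD dp a 0 + PySem.List.pyGetD dp (a - S[p]) 0))
              (pvMk1 (n.toNat+1) (pvF ((S.take p).reverse)))
          else pvMk1 (n.toNat+1) (pvF ((S.take p).reverse)))
        = pvMk1 (n.toNat+1) (pvF ((S.take m.toNat).reverse))
      rw [hstep]
      have hcast : (p : Int) + 1 = ((p + 1 : Nat) : Int) := by push_cast; ring
      rw [hcast]
      exact ih (p + 1) (by omega) (by omega)

theorem B_eval (S : List Int) (m n : Int) (hm0 : 0 ≤ m) (hmlen : m ≤ (S.length : Int)) (hn : 0 ≤ n) :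
    doTheWork_alt S m n = pvF ((S.take m.toNat).reverse) n.toNat := by
  unfold doTheWork_alt
  show PySem.List.pyGetD
      (pvBLoop S m n m.toNat 0 (PySem.List.pySetD (List.replicate (n+1).toNat 0) 0 1)) n 0
    = pvF ((S.take m.toNat).reverse) n.toNat
  have hdp0 : PySem.List.pySetD (List.replicate (n+1).toNat (0:Int)) 0 1
      = pvMk1 (n.toNat+1) (pvF ((S.take 0).reverse)) := by
    rw [PySem.List.pySetD_of_nonneg _ _ (by omega),
        show (n+1).toNat = n.toNat + 1 from by omega, List.replicate_succ,
        List.take_zero, List.reverse_nil, ← pvInit]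
    rfl
  have hout := B_outer S m n hmlen hn m.toNat 0 (by omega) (by omega)
  rw [Nat.cast_zero] at hout
  rw [hdp0, hout, pvMk1_get _ _ _ hn (by omega)]


-- ----- A side: the amount-major 2D table computes the same pvF values -----

-- table contents after the cells up to (row i, column j) (exclusive, row-major) have been filled
def pvGA (S : List Int) (i j : Nat) : Nat → Nat → Int := fun r k =>
  if r = 0 ∨ r < i ∨ (r = i ∧ k < j) then pvF ((S.take (k+1)).reverse) r else 0

theorem A_ones (m n : Int) (hm : 0 ≤ m) :
    ∀ (d : Nat) (p : Nat), m.toNat - p ≤ d →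
    (PySem.List.pyRange (p : Int) m 1).foldl (fun t i => pvSet2 t 0 i 1)
      (pvMk (n.toNat+1) m.toNat (fun r k => if r = 0 ∧ k < p then 1 else 0))
    = pvMk (n.toNat+1) m.toNat (fun r k => if r = 0 then 1 else 0) := by
  intro d
  induction d with
  | zero =>
    intro p hp
    rw [PySem.List.pyRange_one_eq_nil (by omega)]
    exact pvMk_congr _ _ _ _ (fun r k hr hk => by
      by_cases h : r = 0
      · rw [if_pos ⟨h, by omega⟩, if_pos h]
      · rw [if_neg (by tauto), if_neg h])
  | succ d ih =>
    intro p hp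
    by_cases hend : m ≤ (p : Int)
    · rw [PySem.List.pyRange_one_eq_nil hend]
      exact pvMk_congr _ _ _ _ (fun r k hr hk => by
        by_cases h : r = 0
        · rw [if_pos ⟨h, by omega⟩, if_pos h]
        · rw [if_neg (by tauto), if_neg h])
    · rw [PySem.List.pyRange_one_cons (by omega), List.foldl_cons]
      rw [pvMk_set _ _ _ _ _ _ (by omega) (by omega) (by omega) (by omega)]
      have step : (fun r k => if r = (0:Int).toNat ∧ k = (p:Int).toNat then (1:Int) else
              if r = 0 ∧ k < p then 1 else 0)
          = fun r k => if r = 0 ∧ k < p + 1 then (1:Int) else 0 := by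
        funext r k
        by_cases h : r = 0 ∧ k = p
        · rw [if_pos (by simpa using h), if_pos ⟨h.1, by omega⟩]
        · rw [if_neg (by simpa using h)]
          by_cases h2 : r = 0 ∧ k < p
          · rw [if_pos h2, if_pos ⟨h2.1, by omega⟩]
          · rw [if_neg h2, if_neg (by rintro ⟨rfl, hk⟩; exact h2 ⟨rfl, by
              rcases Nat.lt_succ_iff_lt_or_eq.mp hk with h3 | h3
              · exact h3
              · exact absurd ⟨rfl, h3⟩ h⟩)]
      rw [step]
      have hcast : (p : Int) + 1 = ((p + 1 : Nat) : Int) := by push_cast; ring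
      rw [hcast]
      exact ih (p + 1) (by omega)

theorem A_inner (S : List Int) (m n : Int) (hm1 : 1 ≤ m) (hmlen : m ≤ (S.length : Int))
    (hpos : ∀ c ∈ S.take m.toNat, 0 ≤ c) (i : Int) (hi1 : 1 ≤ i) (hin : i ≤ n) :
    ∀ (d : Nat) (j : Nat), m.toNat - j ≤ d → j ≤ m.toNat →
    (PySem.List.pyRange (j : Int) m 1).foldl (fun t j =>
        pvSet2 t i j
          ((if i - PySem.List.pyGetD S j 0 ≥ 0 then pvGet2 t (i - PySem.List.pyGetD S j 0) j else 0)
           + (if j ≥ 1 then pvGet2 t i (j-1) else 0)))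
      (pvMk (n.toNat+1) m.toNat (pvGA S i.toNat j))
    = pvMk (n.toNat+1) m.toNat (pvGA S i.toNat m.toNat) := by
  intro d
  induction d with
  | zero =>
    intro j hjd hjm
    have : j = m.toNat := by omega
    subst this
    rw [PySem.List.pyRange_one_eq_nil (by omega)]
    rfl
  | succ d ih =>
    intro j hjd hjm
    by_cases hend : m ≤ (j : Int)
    · have : j = m.toNat := by omega
      subst this
      rw [PySem.List.pyRange_one_eq_nil (by omega)]
      rfl
    · rw [PySem.List.pyRange_one_cons (show ((j:Int)) < m from by omega), List.foldl_cons]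
      -- facts about the coin S[j]
      have hjS : j < S.length := by omega
      have hc0 : 0 ≤ S[j] := by
        have hlt : j < (S.take m.toNat).length := by rw [List.length_take]; omega
        have hmem := List.getElem_mem hlt
        rw [List.getElem_take] at hmem
        exact hpos _ hmem
      have hcget : PySem.List.pyGetD S (j : Int) 0 = S[j] := by
        rw [PySem.List.pyGetD_eq_getElem _ 0 (by omega) (by omega)]
        simp
      rw [hcget]
      -- take (j+1) splits off the coin
      have htake : (S.take (j+1)).reverse = S[j] :: (S.take j).reverse := by
        rw [List.take_succ, List.getElem?_eq_getElem hjS]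
        simp
      -- the value written equals pvF ((S.take (j+1)).reverse) i.toNat
      have hval :
          ((if i - S[j] ≥ 0 then pvGet2 (pvMk (n.toNat+1) m.toNat (pvGA S i.toNat j)) (i - S[j]) (j:Int) else 0)
           + (if (j:Int) ≥ 1 then pvGet2 (pvMk (n.toNat+1) m.toNat (pvGA S i.toNat j)) i ((j:Int)-1) else 0))
          = pvF ((S.take (j+1)).reverse) i.toNat := by
        have hy : (if (j:Int) ≥ 1 then pvGet2 (pvMk (n.toNat+1) m.toNat (pvGA S i.toNat j)) i ((j:Int)-1) else 0)
            = pvF ((S.take j).reverse) i.toNat := by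
          by_cases hj1 : (j:Int) ≥ 1
          · rw [if_pos hj1, pvMk_get _ _ _ _ _ (by omega) (by omega) (by omega) (by omega)]
            rw [pvGA, if_pos (Or.inr (Or.inr ⟨rfl, by omega⟩))]
            rw [show ((j:Int) - 1).toNat + 1 = j from by omega]
          · rw [if_neg hj1]
            have : j = 0 := by omega
            subst this
            rw [List.take_zero, List.reverse_nil, pvF_nil, if_neg (by omega)]
        rw [htake, pvF_cons _ _ _ (by omega), hy]
        congr 1
        -- x-part
        rcases lt_or_ge i S[j] with hlt | hge
        · rw [if_neg (by omega), if_neg (by omega)]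
        · rw [if_pos (by omega)]
          rcases eq_or_lt_of_le hc0 with hzero | hposj
          · rw [if_neg (by omega), ← hzero, sub_zero,
                pvMk_get _ _ _ _ _ (by omega) (by omega) (by omega) (by omega)]
            rw [pvGA, if_neg (by push_neg; refine ⟨by omega, by omega, fun _ => by omega⟩)]
          · rw [if_pos ⟨hposj, by omega⟩,
                pvMk_get _ _ _ _ _ (by omega) (by omega) (by omega) (by omega)]
            simp only [Int.toNat_natCast]
            rw [pvGA, if_pos (by right; left; omega), htake]
            congr 1
            omega
      rw [pvMk_set _ _ _ _ _ _ (by omega) (by omega) (by omega) (by omega), hval]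
      have step : (fun r k => if r = i.toNat ∧ k = (j:Int).toNat then pvF ((S.take (j+1)).reverse) i.toNat
              else pvGA S i.toNat j r k)
          = pvGA S i.toNat (j+1) := by
        funext r k
        by_cases h : r = i.toNat ∧ k = j
        · obtain ⟨rfl, rfl⟩ := h
          rw [if_pos (by simp), pvGA, if_pos (Or.inr (Or.inr ⟨rfl, by omega⟩))]
        · rw [if_neg (by simpa using h), pvGA, pvGA]
          by_cases h2 : r = 0 ∨ r < i.toNat ∨ (r = i.toNat ∧ k < j)
          · rw [if_pos h2, if_pos (by tauto)]
          · rw [if_neg h2, if_neg (by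
              push_neg at h2 ⊢
              refine ⟨h2.1, h2.2.1, fun hr => ?_⟩
              have := h2.2.2 hr
              have : k ≠ j := fun hk => h ⟨hr, hk⟩
              omega)]
      rw [step]
      have hcast : (j : Int) + 1 = ((j + 1 : Nat) : Int) := by push_cast; ring
      rw [hcast]
      exact ih (j + 1) (by omega) (by omega)

theorem A_outer (S : List Int) (m n : Int) (hm1 : 1 ≤ m) (hmlen : m ≤ (S.length : Int))
    (hpos : ∀ c ∈ S.take m.toNat, 0 ≤ c) (hn : 0 ≤ n) :
    ∀ (d : Nat) (i : Nat), 1 ≤ i → i ≤ n.toNat + 1 → (n.toNat + 1) - i ≤ d →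
    (PySem.List.pyRange (i : Int) (n+1) 1).foldl (fun t i =>
        (PySem.List.pyRange 0 m 1).foldl (fun t j =>
          pvSet2 t i j
            ((if i - PySem.List.pyGetD S j 0 ≥ 0 then pvGet2 t (i - PySem.List.pyGetD S j 0) j else 0)
             + (if j ≥ 1 then pvGet2 t i (j-1) else 0))) t)
      (pvMk (n.toNat+1) m.toNat (pvGA S i 0))
    = pvMk (n.toNat+1) m.toNat (pvGA S (n.toNat+1) 0) := by
  intro d
  induction d with
  | zero =>
    intro i hi1 hi2 hid
    have : i = n.toNat + 1 := by omega
    subst this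
    rw [PySem.List.pyRange_one_eq_nil (show n + 1 ≤ ((n.toNat + 1 : Nat) : Int) from by omega)]
    rfl
  | succ d ih =>
    intro i hi1 hi2 hid
    by_cases hend : n + 1 ≤ (i : Int)
    · have : i = n.toNat + 1 := by omega
      subst this
      rw [PySem.List.pyRange_one_eq_nil (show n + 1 ≤ ((n.toNat + 1 : Nat) : Int) from by omega)]
      rfl
    · rw [PySem.List.pyRange_one_cons (show ((i:Int)) < n + 1 from by omega), List.foldl_cons]
      have hinner := A_inner S m n hm1 hmlen hpos (i : Int) (by omega) (by omega) m.toNat 0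
        (by omega) (by omega)
      rw [show ((0 : Nat) : Int) = (0 : Int) from rfl] at hinner
      rw [show (i : Int).toNat = i from (by omega)] at hinner
      rw [hinner]
      have step : pvMk (n.toNat+1) m.toNat (pvGA S i m.toNat)
          = pvMk (n.toNat+1) m.toNat (pvGA S (i+1) 0) :=
        pvMk_congr _ _ _ _ (fun r k hr hk => by
          rw [pvGA, pvGA]
          by_cases h : r = 0 ∨ r < i ∨ (r = i ∧ k < m.toNat)
          · rw [if_pos h, if_pos (by
              rcases h with h | h | h
              · exact Or.inl h
              · exact Or.inr (Or.inl (by omega))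
              · exact Or.inr (Or.inl (by omega)))]
          · rw [if_neg h, if_neg (by
              push_neg at h ⊢
              exact ⟨h.1, by omega, fun hr2 => by omega⟩)]
        )
      rw [step]
      have hcast : (i : Int) + 1 = ((i + 1 : Nat) : Int) := by push_cast; ring
      rw [hcast]
      exact ih (i + 1) (by omega) (by omega) (by omega)

theorem A_eval (S : List Int) (m n : Int) (hm1 : 1 ≤ m) (hn : 0 ≤ n)
    (hrest : n = 0 ∨ (m ≤ (S.length : Int) ∧ ∀ c ∈ S.take m.toNat, 0 ≤ c)) :
    doTheWork S m n = pvF ((S.take m.toNat).reverse) n.toNat := by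
  unfold doTheWork
  show pvGet2
      ((PySem.List.pyRange 1 (n+1) 1).foldl (fun t i =>
        (PySem.List.pyRange 0 m 1).foldl (fun t j =>
          pvSet2 t i j
            ((if i - PySem.List.pyGetD S j 0 ≥ 0 then pvGet2 t (i - PySem.List.pyGetD S j 0) j else 0)
             + (if j ≥ 1 then pvGet2 t i (j-1) else 0))) t)
        ((PySem.List.pyRange 0 m 1).foldl (fun t i => pvSet2 t 0 i 1)
          ((PySem.List.pyRange 0 (n+1) 1).map (fun _ => (PySem.List.pyRange 0 m 1).map (fun _ => (0:Int))))))
      n (m-1)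
    = pvF ((S.take m.toNat).reverse) n.toNat
  -- the initial all-zero table is a tabulation
  have hinit : (PySem.List.pyRange 0 (n+1) 1).map (fun _ => (PySem.List.pyRange 0 m 1).map (fun _ => (0:Int)))
      = pvMk (n.toNat+1) m.toNat (fun r k => if r = 0 ∧ k < 0 then 1 else 0) := by
    have h1 : (n+1).toNat = n.toNat + 1 := by omega
    rw [PySem.List.pyRange_zero (n+1), PySem.List.pyRange_zero m, h1]
    simp [pvMk, pvMk1, List.map_map, Function.comp_def]
  rw [hinit]
  have hones := A_ones m n (by omega) m.toNat 0 (by omega)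
  rw [show ((0 : Nat) : Int) = (0 : Int) from rfl] at hones
  rw [hones]
  rcases hrest with hzero | ⟨hmlen, hpos⟩
  · -- n = 0: the outer loop body never runs, the answer is row 0 = 1
    subst hzero
    rw [PySem.List.pyRange_one_eq_nil (show (0:Int) + 1 ≤ 1 from by omega), List.foldl_nil]
    rw [pvMk_get _ _ _ _ _ (by omega) (by omega) (by omega) (by omega)]
    rw [if_pos (by omega)]
    exact (pvF_zero _).symm
  · -- n ≥ 0 with well-formed coins
    have hstart : pvMk (n.toNat+1) m.toNat (fun r k => if r = 0 then (1:Int) else 0)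
        = pvMk (n.toNat+1) m.toNat (pvGA S 1 0) :=
      pvMk_congr _ _ _ _ (fun r k hr hk => by
        rw [pvGA]
        by_cases h : r = 0
        · rw [if_pos h, if_pos (Or.inl h), h, pvF_zero]
        · rw [if_neg h, if_neg (by push_neg; exact ⟨h, by omega, fun hr2 => by omega⟩)])
    rw [hstart]
    have houter := A_outer S m n hm1 hmlen hpos hn ((n.toNat + 1) - 1) 1 (by omega) (by omega) (by omega)
    rw [show ((1 : Nat) : Int) = (1 : Int) from rfl] at houter
    rw [houter]
    rw [pvMk_get _ _ _ _ _ (by omega) (by omega) (by omega) (by omega)]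
    rw [pvGA, if_pos (by right; left; omega)]
    rw [show (m - 1).toNat + 1 = m.toNat from by omega]

-- ===== VERDICT (by name: the statement is the Claim_ definition above) =====
theorem doTheWork_spec : Claim_equal_doTheWork := by
  intro S m n _ hpre
  obtain ⟨hm1, hn, hmlen, hco⟩ := hpre
  unfold Spec_doTheWork
  have hrest : n = 0 ∨ (m ≤ (S.length : Int) ∧ ∀ c ∈ S.take m.toNat, 0 ≤ c) := by
    rcases hco with h | h
    · exact Or.inl h
    · exact Or.inr ⟨hmlen, h⟩
  rw [A_eval S m n hm1 hn hrest, B_eval S m n (by omega) hmlen hn]
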